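-- pv_equiv track=rewrite | github.com/rjovelin/Rosalind | Textbook_track/BA1J/BA1J2.py | FastNumberToPattern
-- ===== SOURCE A (Python) =====
-- def FastNumberToPattern(index, k):
--     '''
--     (str) -> int
--     Take the index kmer in the list of all possible kmers of length k
--     ordered lexicographically and the length k and return the corresponding kmer
--     '''
--
--     # use the following relationship
--     # PatternToNumber(Pattern) = 4 · PatternToNumber(Prefix(Pattern)) + SymbolToNumber(LastSymbol(Pattern))
--     # where Prefix(Pattern) = Pattern minus last symbol
--     # and SymBolToNumber of last symol of Pattern is defined by A = 0, C = 1, G = 2, T =3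
--
--     NumberToSymbol = {0:'A', 1: 'C', 2: 'G', 3: 'T'}
--
--     if k == 1:
--         return NumberToSymbol[index]
--     prefixIndex = index // 4
--     remainder = index % 4
--     symbol = NumberToSymbol[remainder]
--     PrefixPattern = FastNumberToPattern(prefixIndex, k - 1)
--     return PrefixPattern + symbol
-- ===== SOURCE B (Python) =====
-- def FastNumberToPattern(index, k):
--     NumberToSymbol = {0: 'A', 1: 'C', 2: 'G', 3: 'T'}
--     syms = []
--     for _ in range(k - 1):
--         syms.append(NumberToSymbol[index % 4])
--         index //= 4
--     syms.append(NumberToSymbol[index])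
--     return ''.join(reversed(syms))
-- ===== Notes on version B (the rewrite author's own statement) =====
-- stated objective: idiomatic
-- what changed: Replaces the recursion on k with a single iterative loop that peels off the least-significant base-4 digit k-1 times into a list, looks up the top symbol from the remaining value, and joins the reversed list.
import Mathlib
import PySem

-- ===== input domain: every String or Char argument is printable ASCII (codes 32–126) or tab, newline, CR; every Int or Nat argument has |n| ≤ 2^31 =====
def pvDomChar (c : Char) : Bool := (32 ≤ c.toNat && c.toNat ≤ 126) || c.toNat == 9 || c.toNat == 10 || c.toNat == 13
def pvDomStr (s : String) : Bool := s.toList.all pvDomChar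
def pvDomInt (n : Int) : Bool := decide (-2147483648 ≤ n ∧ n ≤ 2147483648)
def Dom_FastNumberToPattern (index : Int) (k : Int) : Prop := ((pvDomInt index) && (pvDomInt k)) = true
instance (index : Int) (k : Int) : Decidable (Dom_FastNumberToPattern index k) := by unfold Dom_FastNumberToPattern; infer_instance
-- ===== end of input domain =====

-- B replaces A's recursion on k by one iterative digit-peeling loop (same O(k) cost; objective: idiomatic).

-- ===== PORT A =====
-- the literal dict {0:'A', 1:'C', 2:'G', 3:'T'} both Pythons build
def pvNumberToSymbol : PySem.Dict Int String :=
  PySem.Dict.ofList [(0, "A"), (1, "C"), (2, "G"), (3, "T")]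

-- recursion of A; the guard 'k ≤ 1' (Python tests k == 1) only makes the recursion total:
-- for k < 1 Python never returns (infinite recursion), which Pre_ excludes.
def FastNumberToPattern (index : Int) (k : Int) : String :=
  if k ≤ 1 then
    PySem.Dict.getD pvNumberToSymbol index ""
  else
    let prefixIndex := PySem.Int.floordiv index 4
    let remainder := PySem.Int.mod index 4
    let symbol := PySem.Dict.getD pvNumberToSymbol remainder ""
    let PrefixPattern := FastNumberToPattern prefixIndex (k - 1)
    PrefixPattern ++ symbol
termination_by (k - 1).toNat
decreasing_by omega

-- ===== PORT B =====
def FastNumberToPattern_alt (index : Int) (k : Int) : String :=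
  let st := (PySem.List.pyRange 0 (k - 1) 1).foldl
    (fun (st : List String × Int) _ =>
      (st.1 ++ [PySem.Dict.getD pvNumberToSymbol (PySem.Int.mod st.2 4) ""],
       PySem.Int.floordiv st.2 4))
    ([], index)
  let syms := st.1 ++ [PySem.Dict.getD pvNumberToSymbol st.2 ""]
  PySem.Str.join "" syms.reverse

-- ===== PRECONDITION & SPEC =====
-- Pre_: exactly where Python A returns (k ≥ 1 and 0 ≤ index < 4^k); otherwise A raises
-- KeyError (index outside 0..3 at the base case) or recurses forever (k < 1).
def Pre_FastNumberToPattern (index : Int) (k : Int) : Prop :=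
  1 ≤ k ∧ 0 ≤ index ∧ index < 4 ^ k.toNat
instance (index : Int) (k : Int) : Decidable (Pre_FastNumberToPattern index k) := by
  unfold Pre_FastNumberToPattern; infer_instance

def pvWitness_FastNumberToPattern : Int × Int := (5, 2)

def Spec_FastNumberToPattern (index : Int) (k : Int) (out : String) : Prop := out = FastNumberToPattern_alt index k
instance (index : Int) (k : Int) (out : String) : Decidable (Spec_FastNumberToPattern index k out) := by unfold Spec_FastNumberToPattern; infer_instance

-- ===== CLAIM (what is proved, stated in full; the proofs are below) =====
def Claim_equal_FastNumberToPattern : Prop := ∀ (index : Int) (k : Int), Dom_FastNumberToPattern index k → Pre_FastNumberToPattern index k → Spec_FastNumberToPattern index k (FastNumberToPattern index k)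

-- ===== LEMMAS AND PROOFS =====

-- B's loop step, as a function of the state only (the loop variable is unused)
def pvStep (st : List String × Int) : List String × Int :=
  (st.1 ++ [PySem.Dict.getD pvNumberToSymbol (PySem.Int.mod st.2 4) ""],
   PySem.Int.floordiv st.2 4)

theorem pv_foldl_const {α β : Type} (f : α → α) (l : List β) (s : α) :
    l.foldl (fun a _ => f a) s = f^[l.length] s := by
  induction l generalizing s with
  | nil => rfl
  | cons x t ih => simpa [Function.iterate_succ_apply] using ih (f s)

theorem pvStep_shift (n : Nat) (pre : List String) (i : Int) :
    pvStep^[n] (pre, i) = (pre ++ (pvStep^[n] ([], i)).1, (pvStep^[n] ([], i)).2) := by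
  induction n generalizing pre i with
  | zero => simp
  | succ m ih =>
      rw [Function.iterate_succ_apply, Function.iterate_succ_apply]
      rw [show pvStep (pre, i) = (pre ++ [PySem.Dict.getD pvNumberToSymbol (PySem.Int.mod i 4) ""], PySem.Int.floordiv i 4) from rfl]
      rw [show pvStep (([] : List String), i) = ([PySem.Dict.getD pvNumberToSymbol (PySem.Int.mod i 4) ""], PySem.Int.floordiv i 4) from rfl]
      rw [ih, ih [PySem.Dict.getD pvNumberToSymbol (PySem.Int.mod i 4) ""]]
      simp

theorem pv_flatten_intersperse_nil (l : List (List Char)) :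
    (List.intersperse ([] : List Char) l).flatten = l.flatten := by
  induction l with
  | nil => rfl
  | cons a t ih =>
    cases t with
    | nil => rfl
    | cons b u => simp only [List.intersperse_cons₂, List.flatten_cons] at ih ⊢; simp [ih]

theorem pv_join_empty_append (xs ys : List String) :
    PySem.Str.join "" (xs ++ ys) = PySem.Str.join "" xs ++ PySem.Str.join "" ys := by
  simp [PySem.Str.join, PySem.Chars.join, List.intercalate, pv_flatten_intersperse_nil]

theorem pv_join_singleton (s : String) : PySem.Str.join "" [s] = s := by
  simp [PySem.Str.join, PySem.Chars.join, List.intercalate]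

-- B written with an explicit iteration count
theorem pv_alt_iter (index k : Int) :
    FastNumberToPattern_alt index k =
      PySem.Str.join ""
        (((pvStep^[(k - 1).toNat] ([], index)).1
          ++ [PySem.Dict.getD pvNumberToSymbol (pvStep^[(k - 1).toNat] ([], index)).2 ""]).reverse) := by
  unfold FastNumberToPattern_alt
  rw [show (fun (st : List String × Int) _ =>
      (st.1 ++ [PySem.Dict.getD pvNumberToSymbol (PySem.Int.mod st.2 4) ""],
       PySem.Int.floordiv st.2 4)) = (fun (st : List String × Int) (_ : Int) => pvStep st) from rfl]
  rw [pv_foldl_const pvStep]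
  simp [PySem.List.length_pyRange_one]

theorem pv_alt_base (index k : Int) (h : k ≤ 1) :
    FastNumberToPattern_alt index k = PySem.Dict.getD pvNumberToSymbol index "" := by
  rw [pv_alt_iter]
  rw [show (k - 1).toNat = 0 by omega]
  simp [pv_join_singleton]

theorem pv_alt_rec (index k : Int) (h : 1 < k) :
    FastNumberToPattern_alt index k =
      FastNumberToPattern_alt (PySem.Int.floordiv index 4) (k - 1)
        ++ PySem.Dict.getD pvNumberToSymbol (PySem.Int.mod index 4) "" := by
  rw [pv_alt_iter, pv_alt_iter]
  rw [show (k - 1).toNat = (k - 1 - 1).toNat + 1 by omega]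
  rw [Function.iterate_succ_apply]
  rw [show pvStep (([] : List String), index) = ([PySem.Dict.getD pvNumberToSymbol (PySem.Int.mod index 4) ""], PySem.Int.floordiv index 4) from rfl]
  rw [pvStep_shift]
  simp
  rw [← List.cons_append, pv_join_empty_append, pv_join_singleton]

theorem pv_main (n : Nat) : ∀ (index k : Int), (k - 1).toNat = n →
    FastNumberToPattern index k = FastNumberToPattern_alt index k := by
  induction n with
  | zero =>
      intro index k hk
      rw [FastNumberToPattern, if_pos (by omega), pv_alt_base index k (by omega)]
  | succ m ih =>
      intro index k hk
      rw [FastNumberToPattern, if_neg (by omega), pv_alt_rec index k (by omega)]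
      simp only []
      rw [ih (PySem.Int.floordiv index 4) (k - 1) (by omega)]

-- ===== VERDICT (by name: the statement is the Claim_ definition above) =====
theorem FastNumberToPattern_spec : Claim_equal_FastNumberToPattern := by
  intro index k _ _
  unfold Spec_FastNumberToPattern
  exact pv_main (k - 1).toNat index k rfl
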